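-- pv_equiv track=rewrite | github.com/TDA-2C-2024/TP-CURSO-ANUAL | tercera_parte/verificador_eficiente.py | son_contiguas
-- ===== SOURCE A (Python) =====
-- def son_contiguas(posiciones):
--     if len(posiciones) == 1:
--         return True
--
--     es_horizontal = False
--     (x0, y0) = posiciones[0]
--     (x1, y1) = posiciones[1]
--
--     if x0 == x1 and y1 == y0 + 1:
--         es_horizontal = True
--     elif y0 == y1 and x1 == x0 + 1:
--         es_horizontal = False
--     else:
--         return False
--
--     for (x2, y2), (x3, y3) in zip(posiciones[1:], posiciones[2:]):
--         if x2 == x3 and y3 == y2 + 1 and es_horizontal: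
--             continue
--         elif y2 == y3 and x3 == x2 + 1 and not es_horizontal:
--             continue
--         else:
--             return False
--     return True
-- ===== SOURCE B (Python) =====
-- def son_contiguas(posiciones):
--     if len(posiciones) == 1:
--         return True
--     (x0, y0) = posiciones[0]
--     (x1, y1) = posiciones[1]
--     if x0 == x1 and y1 == y0 + 1:
--         dx, dy = 0, 1
--     elif y0 == y1 and x1 == x0 + 1:
--         dx, dy = 1, 0
--     else:
--         return False
--     for i, (xi, yi) in enumerate(posiciones):
--         if xi != x0 + i * dx or yi != y0 + i * dy:
--             return False
--     return True
-- ===== Notes on version B (the rewrite author's own statement) =====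
-- stated objective: alternative
-- what changed: B derives the step (dx,dy) once from the first two points and checks every point against the closed form (x0+i*dx, y0+i*dy) by index, instead of A's pairwise comparison of each consecutive pair via zip of two shifted slices.
import Mathlib
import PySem

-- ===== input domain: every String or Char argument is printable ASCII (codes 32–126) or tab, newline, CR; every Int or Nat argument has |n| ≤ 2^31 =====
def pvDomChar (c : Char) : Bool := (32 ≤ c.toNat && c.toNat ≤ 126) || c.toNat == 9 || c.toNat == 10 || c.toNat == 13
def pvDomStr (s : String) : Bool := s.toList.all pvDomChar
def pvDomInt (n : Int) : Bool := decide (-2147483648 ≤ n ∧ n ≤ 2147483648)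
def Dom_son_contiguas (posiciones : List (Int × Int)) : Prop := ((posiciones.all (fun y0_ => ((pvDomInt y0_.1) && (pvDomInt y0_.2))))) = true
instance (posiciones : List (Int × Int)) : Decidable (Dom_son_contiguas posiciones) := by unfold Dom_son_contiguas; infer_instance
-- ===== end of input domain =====

-- B checks each point against the closed form first+i*step instead of A's consecutive-pair scan; same cost, different decomposition.
-- Pre_ excludes only the empty list, on which both Pythons raise IndexError at posiciones[0].

-- ===== PORT A =====
-- the for-loop over zip(posiciones[1:], posiciones[2:]), recursing on both lists
def sonLoopA (es_horizontal : Bool) : List (Int × Int) → List (Int × Int) → Bool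
  | (x2, y2) :: r1, (x3, y3) :: r2 =>
    if x2 == x3 && y3 == y2 + 1 && es_horizontal then sonLoopA es_horizontal r1 r2
    else if y2 == y3 && x3 == x2 + 1 && !es_horizontal then sonLoopA es_horizontal r1 r2
    else false
  | _, _ => true

def son_contiguas (posiciones : List (Int × Int)) : Bool :=
  if posiciones.length == 1 then true
  else match posiciones with
  | (x0, y0) :: (x1, y1) :: rest =>
    if x0 == x1 && y1 == y0 + 1 then
      sonLoopA true ((x1, y1) :: rest) rest            -- posiciones[1:] zip posiciones[2:]
    else if y0 == y1 && x1 == x0 + 1 then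
      sonLoopA false ((x1, y1) :: rest) rest
    else false
  | _ => false  -- empty list: Python raises IndexError (excluded by Pre_)

-- ===== PORT B =====
-- the enumerate loop: index i and the closed-form check
def sonLoopB (x0 y0 dx dy : Int) : Int → List (Int × Int) → Bool
  | _, [] => true
  | i, (xi, yi) :: rest =>
    if xi != x0 + i * dx || yi != y0 + i * dy then false
    else sonLoopB x0 y0 dx dy (i + 1) rest

def son_contiguas_alt (posiciones : List (Int × Int)) : Bool :=
  if posiciones.length == 1 then true
  else match posiciones with
  | (x0, y0) :: (x1, y1) :: _ =>
    if x0 == x1 && y1 == y0 + 1 then sonLoopB x0 y0 0 1 0 posiciones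
    else if y0 == y1 && x1 == x0 + 1 then sonLoopB x0 y0 1 0 0 posiciones
    else false
  | _ => false  -- empty list: Python raises IndexError (excluded by Pre_)

-- ===== PRECONDITION & SPEC =====
-- A raises IndexError on the empty list (posiciones[0]); that is the only excluded input.
def Pre_son_contiguas (posiciones : List (Int × Int)) : Prop := posiciones ≠ []
instance (posiciones : List (Int × Int)) : Decidable (Pre_son_contiguas posiciones) := by unfold Pre_son_contiguas; infer_instance
def pvWitness_son_contiguas : (List (Int × Int)) := [(0, 0), (0, 1), (0, 2)]

def Spec_son_contiguas (posiciones : List (Int × Int)) (out : Bool) : Prop := out = son_contiguas_alt posiciones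
instance (posiciones : List (Int × Int)) (out : Bool) : Decidable (Spec_son_contiguas posiciones out) := by unfold Spec_son_contiguas; infer_instance

-- ===== CLAIM (what is proved, stated in full; the proofs are below) =====
def Claim_equal_son_contiguas : Prop := ∀ (posiciones : List (Int × Int)), Dom_son_contiguas posiciones → Pre_son_contiguas posiciones → Spec_son_contiguas posiciones (son_contiguas posiciones)

-- ===== LEMMAS AND PROOFS =====

-- vertical case: A's pairwise scan from (x,y) equals B's closed-form check from index i,
-- provided (x,y) is the point the closed form predicts at index i
theorem loop_vert (rest : List (Int × Int)) : ∀ (x y x0 y0 i : Int),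
    x = x0 → y = y0 + i →
    sonLoopA true ((x, y) :: rest) rest = sonLoopB x0 y0 0 1 i ((x, y) :: rest) := by
  induction rest with
  | nil =>
    intro x y x0 y0 i hx hy
    simp [sonLoopA, sonLoopB, hx, hy]
  | cons p r ih =>
    intro x y x0 y0 i hx hy
    obtain ⟨x', y'⟩ := p
    by_cases h : x' = x ∧ y' = y + 1
    · obtain ⟨h1, h2⟩ := h
      have hA : sonLoopA true ((x, y) :: (x', y') :: r) ((x', y') :: r)
          = sonLoopA true ((x', y') :: r) r := by
        simp [sonLoopA, h1, h2]
      have hB : sonLoopB x0 y0 0 1 i ((x, y) :: (x', y') :: r)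
          = sonLoopB x0 y0 0 1 (i + 1) ((x', y') :: r) := by
        simp [sonLoopB, hx, hy]
      rw [hA, hB, ih x' y' x0 y0 (i + 1) (by omega) (by omega)]
    · have hA : sonLoopA true ((x, y) :: (x', y') :: r) ((x', y') :: r) = false := by
        simp only [sonLoopA]
        split_ifs with h1 h2
        · exfalso; simp at h1; exact h ⟨h1.1.symm, h1.2⟩
        · exfalso; simp at h2
        · rfl
      have hB : sonLoopB x0 y0 0 1 i ((x, y) :: (x', y') :: r) = false := by
        have : sonLoopB x0 y0 0 1 i ((x, y) :: (x', y') :: r)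
            = sonLoopB x0 y0 0 1 (i + 1) ((x', y') :: r) := by
          simp [sonLoopB, hx, hy]
        rw [this]
        simp only [sonLoopB]
        split_ifs with h1
        · rfl
        · exfalso; simp at h1; exact h ⟨by omega, by omega⟩
      rw [hA, hB]

-- horizontal case: same statement with step (1,0)
theorem loop_horiz (rest : List (Int × Int)) : ∀ (x y x0 y0 i : Int),
    x = x0 + i → y = y0 →
    sonLoopA false ((x, y) :: rest) rest = sonLoopB x0 y0 1 0 i ((x, y) :: rest) := by
  induction rest with
  | nil =>
    intro x y x0 y0 i hx hy
    simp [sonLoopA, sonLoopB, hx, hy]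
  | cons p r ih =>
    intro x y x0 y0 i hx hy
    obtain ⟨x', y'⟩ := p
    by_cases h : y' = y ∧ x' = x + 1
    · obtain ⟨h1, h2⟩ := h
      have hA : sonLoopA false ((x, y) :: (x', y') :: r) ((x', y') :: r)
          = sonLoopA false ((x', y') :: r) r := by
        simp [sonLoopA, h1, h2]
      have hB : sonLoopB x0 y0 1 0 i ((x, y) :: (x', y') :: r)
          = sonLoopB x0 y0 1 0 (i + 1) ((x', y') :: r) := by
        simp [sonLoopB, hx, hy]
      rw [hA, hB, ih x' y' x0 y0 (i + 1) (by omega) (by omega)]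
    · have hA : sonLoopA false ((x, y) :: (x', y') :: r) ((x', y') :: r) = false := by
        simp only [sonLoopA]
        split_ifs with h1 h2
        · exfalso; simp at h1
        · exfalso; simp at h2; exact h ⟨h2.1.symm, h2.2⟩
        · rfl
      have hB : sonLoopB x0 y0 1 0 i ((x, y) :: (x', y') :: r) = false := by
        have : sonLoopB x0 y0 1 0 i ((x, y) :: (x', y') :: r)
            = sonLoopB x0 y0 1 0 (i + 1) ((x', y') :: r) := by
          simp [sonLoopB, hx, hy]
        rw [this]
        simp only [sonLoopB]
        split_ifs with h1
        · rfl
        · exfalso; simp at h1; exact h ⟨by omega, by omega⟩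
      rw [hA, hB]

-- ===== VERDICT (by name: the statement is the Claim_ definition above) =====
theorem son_contiguas_spec : Claim_equal_son_contiguas := by
  intro posiciones _ hpre
  unfold Spec_son_contiguas
  match posiciones with
  | [] => exact absurd rfl hpre
  | [p] => rfl
  | (x0, y0) :: (x1, y1) :: rest =>
    by_cases hv : x0 = x1 ∧ y1 = y0 + 1
    · obtain ⟨h1, h2⟩ := hv
      subst h1; subst h2
      have hA : son_contiguas ((x0, y0) :: (x0, y0 + 1) :: rest)
          = sonLoopA true ((x0, y0 + 1) :: rest) rest := by
        simp [son_contiguas]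
      have hB : son_contiguas_alt ((x0, y0) :: (x0, y0 + 1) :: rest)
          = sonLoopB x0 y0 0 1 1 ((x0, y0 + 1) :: rest) := by
        simp [son_contiguas_alt, sonLoopB]
      rw [hA, hB]
      exact loop_vert rest x0 (y0 + 1) x0 y0 1 (by omega) (by omega)
    · by_cases hh : y0 = y1 ∧ x1 = x0 + 1
      · obtain ⟨h1, h2⟩ := hh
        subst h1; subst h2
        have hne : ¬ ((x0 == x0 + 1 && y0 + 0 == y0 + 1) = true) := by simp
        have hA : son_contiguas ((x0, y0) :: (x0 + 1, y0) :: rest)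
            = sonLoopA false ((x0 + 1, y0) :: rest) rest := by
          simp [son_contiguas]
        have hB : son_contiguas_alt ((x0, y0) :: (x0 + 1, y0) :: rest)
            = sonLoopB x0 y0 1 0 1 ((x0 + 1, y0) :: rest) := by
          simp [son_contiguas_alt, sonLoopB]
        rw [hA, hB]
        exact loop_horiz rest (x0 + 1) y0 x0 y0 1 (by omega) (by omega)
      · have hvf : (x0 == x1 && y1 == y0 + 1) = false := by
          rcases Decidable.not_and_iff_not_or_not.mp hv with h | h <;> simp [h]
        have hhf : (y0 == y1 && x1 == x0 + 1) = false := by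
          rcases Decidable.not_and_iff_not_or_not.mp hh with h | h <;> simp [h]
        simp [son_contiguas, son_contiguas_alt, hvf, hhf]
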